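-- pv_equiv track=rewrite | github.com/gasperxy/RAC2 | Datoteke/Vaje1/merjenje.py | zabica_iterativno
-- ===== SOURCE A (Python) =====
-- def zabica_iterativno(mocvara):
--     """Iterativno izračuna najmanjše število potrebnih skokov, da žabica zapusti močvaro."""
--     n = len(mocvara)
--     dp = [[0] * (n + 1) for _ in range(n + 1)]
--
--     for i in range(n + 1):
--         dp[n][i] = 0
--         dp[n - 1][i] = 1
--
--     for i in range(n - 1, -1, -1):
--         for j in range(n - 1, -1, -1):
--             m = n
--             e = j
--             e += mocvara[i]
--
--             if i + j > n:
--                 dp[i][j] = 1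
--                 continue
--
--             for d in range(1, e + 1):
--                 if i + d >= n:
--                     m = 0
--                 else:
--                     if e - d >= n:
--                         m = 1
--                     else:
--                         m = min(m, dp[i + d][e - d])
--             dp[i][j] = 1 + m
--     return dp[0][0]
-- ===== SOURCE B (Python) =====
-- def zabica_iterativno(mocvara):
--     """Iterativno izračuna najmanjše število potrebnih skokov, da žabica zapusti močvaro."""
--     n = len(mocvara)
--     if n == 0:
--         return 1
--     # T[s] = min of dp[p][s - p] over already-computed rows p > i (cells on anti-diagonal s)
--     T = [n + 2] * n
--     row = []
--     for i in range(n - 1, -1, -1):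
--         row = [0] * (n - i)
--         for j in range(n - i):
--             e = j + mocvara[i]
--             if e <= 0:
--                 row[j] = 1 + n
--             elif i + e >= n:
--                 row[j] = 1
--             else:
--                 row[j] = 1 + min(n, T[i + e])
--         for j in range(n - i):
--             if row[j] < T[i + j]:
--                 T[i + j] = row[j]
--     return row[0]
-- ===== Notes on version B (the rewrite author's own statement) =====
-- stated objective: faster
-- what changed: B drops the full (n+1)x(n+1) table and A's innermost loop over every jump distance d, instead filling each row from an array of anti-diagonal suffix minima of the DP values that is updated once per row, so each cell costs O(1) instead of O(energy).
import Mathlib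
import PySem

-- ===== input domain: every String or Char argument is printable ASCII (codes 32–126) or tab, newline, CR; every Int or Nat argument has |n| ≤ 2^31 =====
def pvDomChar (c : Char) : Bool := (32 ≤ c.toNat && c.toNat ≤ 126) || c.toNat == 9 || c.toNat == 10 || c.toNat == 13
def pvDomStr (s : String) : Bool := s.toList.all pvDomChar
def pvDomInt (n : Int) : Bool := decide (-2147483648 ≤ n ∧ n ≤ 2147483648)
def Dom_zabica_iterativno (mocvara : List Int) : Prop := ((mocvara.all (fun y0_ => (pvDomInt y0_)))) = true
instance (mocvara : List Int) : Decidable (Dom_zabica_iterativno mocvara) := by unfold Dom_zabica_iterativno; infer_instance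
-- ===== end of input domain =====

-- B replaces A's innermost minimisation loop (over every jump length) by an O(1) lookup in an
-- array of anti-diagonal minima of the DP table, maintained once per row.

-- ===== PORT A =====
def zabica_iterativno (mocvara : List Int) : Int :=
  let n : Int := mocvara.length
  let dp : List (List Int) := List.replicate (n + 1).toNat (List.replicate (n + 1).toNat (0 : Int))
  let dp := (PySem.List.pyRange 0 (n + 1) 1).foldl (fun dp i =>
    let dp := PySem.List.pySetD dp n (PySem.List.pySetD (PySem.List.pyGetD dp n []) i 0)
    PySem.List.pySetD dp (n - 1) (PySem.List.pySetD (PySem.List.pyGetD dp (n - 1) []) i 1)) dp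
  let dp := (PySem.List.pyRange (n - 1) (-1) (-1)).foldl (fun dp i =>
    (PySem.List.pyRange (n - 1) (-1) (-1)).foldl (fun dp j =>
      let m : Int := n
      let e : Int := j + PySem.List.pyGetD mocvara i 0
      if i + j > n then
        PySem.List.pySetD dp i (PySem.List.pySetD (PySem.List.pyGetD dp i []) j 1)
      else
        let m := (PySem.List.pyRange 1 (e + 1) 1).foldl (fun m d =>
          if i + d ≥ n then 0
          else if e - d ≥ n then 1
          else min m (PySem.List.pyGetD (PySem.List.pyGetD dp (i + d) []) (e - d) 0)) m
        PySem.List.pySetD dp i (PySem.List.pySetD (PySem.List.pyGetD dp i []) j (1 + m))) dp) dp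
  PySem.List.pyGetD (PySem.List.pyGetD dp 0 []) 0 0

-- ===== PORT B =====
def zabica_iterativno_alt (mocvara : List Int) : Int :=
  let n : Int := mocvara.length
  if n = 0 then 1
  else
    let T : List Int := List.replicate n.toNat (n + 2)
    let row : List Int := []
    let st := (PySem.List.pyRange (n - 1) (-1) (-1)).foldl (fun (st : List Int × List Int) i =>
      let T := st.1
      let row : List Int := List.replicate (n - i).toNat (0 : Int)
      let row := (PySem.List.pyRange 0 (n - i) 1).foldl (fun row j =>
        let e : Int := j + PySem.List.pyGetD mocvara i 0
        if e ≤ 0 then PySem.List.pySetD row j (1 + n)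
        else if i + e ≥ n then PySem.List.pySetD row j 1
        else PySem.List.pySetD row j (1 + min n (PySem.List.pyGetD T (i + e) 0))) row
      let T := (PySem.List.pyRange 0 (n - i) 1).foldl (fun T j =>
        if PySem.List.pyGetD row j 0 < PySem.List.pyGetD T (i + j) 0 then
          PySem.List.pySetD T (i + j) (PySem.List.pyGetD row j 0)
        else T) T
      (T, row)) (T, row)
    PySem.List.pyGetD st.2 0 0

-- ===== PRECONDITION & SPEC =====
def Spec_zabica_iterativno (mocvara : List Int) (out : Int) : Prop := out = zabica_iterativno_alt mocvara
instance (mocvara : List Int) (out : Int) : Decidable (Spec_zabica_iterativno mocvara out) := by unfold Spec_zabica_iterativno; infer_instance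

-- ===== CLAIM (what is proved, stated in full; the proofs are below) =====
def Claim_equal_zabica_iterativno : Prop := ∀ (mocvara : List Int), Dom_zabica_iterativno mocvara → Spec_zabica_iterativno mocvara (zabica_iterativno mocvara)

-- ===== LEMMAS AND PROOFS =====

-- the common value function: frogV fuel i j = min jumps from cell (i, j) (fuel ≥ n - i > 0)
def frogV (moc : List Int) : Nat → Nat → Nat → Int
  | 0, _, _ => 0
  | (fuel+1), i, j =>
    let e : Int := (j : Int) + moc.getD i 0
    if e ≤ 0 then (moc.length : Int) + 1
    else if (moc.length : Int) ≤ (i : Int) + e then 1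
    else 1 + (((List.range' (i+1) (((i : Int) + e).toNat - i)).map
        (fun p => frogV moc fuel p (((i : Int) + e).toNat - p))).foldl min (moc.length : Int))

def fzV (moc : List Int) (i j : Nat) : Int := frogV moc (moc.length - i) i j

-- what A stores in cell (i, j) (cells with i+j > n get the constant 1, and are never read back)
def fzW (moc : List Int) (p q : Nat) : Int := if moc.length < p + q then 1 else fzV moc p q

-- minimum of fzV over the anti-diagonal s, rows p = i..s, seeded with n+2 (B's T array entry)
def fzDiag (moc : List Int) (i s : Nat) : Int :=
  ((List.range' i (s + 1 - i)).map (fun p => fzV moc p (s - p))).foldl min ((moc.length : Int) + 2)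

-- descending / ascending Int index lists
def fzDesc (k : Nat) : List Int := ((List.range k).map (fun t : Nat => (t : Int))).reverse

lemma fzDesc_succ (k : Nat) : fzDesc (k+1) = (k : Int) :: fzDesc k := by
  simp [fzDesc, List.range_succ]

lemma fzRange_asc (k : Nat) : PySem.List.pyRange 0 (k : Int) 1 = (List.range k).map (fun t : Nat => (t : Int)) := by
  exact PySem.List.pyRange_zero_nat k

lemma fzRange_desc (n : Nat) : PySem.List.pyRange ((n : Int) - 1) (-1) (-1) = fzDesc n := by
  rw [PySem.List.pyRange_neg_one_eq_reverse, show ((-1 : Int) + 1) = 0 from rfl,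
    show ((n : Int) - 1 + 1) = (n : Int) by ring, fzRange_asc]
  rfl

-- getD/set helpers
lemma fz_getD_set_self {α : Type} (l : List α) (a : Nat) (v d : α) (h : a < l.length) :
    (l.set a v).getD a d = v := by simp [List.getD, h]

lemma fz_getD_set_ne {α : Type} (l : List α) (a p : Nat) (v d : α) (h : p ≠ a) :
    (l.set a v).getD p d = l.getD p d := by
  simp [List.getD, Ne.symm h]

-- pulling an element out of a min-fold
lemma fzFoldlMin (a b : Int) (l : List Int) :
    List.foldl min (min a b) l = min b (List.foldl min a l) := by
  induction l generalizing a with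
  | nil => simp [min_comm]
  | cons c l ih =>
      simp only [List.foldl_cons]
      rw [show min (min a b) c = min (min a c) b by
        rw [min_assoc, min_assoc, min_comm b c], ih]

-- fuel irrelevance
lemma frogV_congr (moc : List Int) : ∀ (f1 : Nat) (f2 i j : Nat), i < moc.length →
    moc.length - i ≤ f1 → moc.length - i ≤ f2 → frogV moc f1 i j = frogV moc f2 i j := by
  intro f1
  induction f1 with
  | zero => intro f2 i j hi h1 _; omega
  | succ f1 ih =>
      intro f2 i j hi h1 h2
      obtain ⟨f2', rfl⟩ : ∃ k, f2 = k + 1 := ⟨f2 - 1, by omega⟩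
      show frogV moc (f1+1) i j = frogV moc (f2'+1) i j
      simp only [frogV]
      split
      · rfl
      · split
        · rfl
        · rename_i he hn
          have he' : (0:Int) < (j : Int) + moc.getD i 0 := by omega
          have hs : ((i : Int) + ((j : Int) + moc.getD i 0)).toNat < moc.length := by omega
          congr 1
          congr 1
          apply List.map_congr_left
          intro p hp
          have hp' := List.mem_range'.mp hp
          have hpn : p < moc.length := by omega
          rw [ih f1 p _ hpn (by omega) (by omega),
              ih f2' p _ hpn (by omega) (by omega)]

-- branch lemmas for fzV
lemma fzV_le (moc : List Int) (i j : Nat) (hi : i < moc.length)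
    (he : (j : Int) + moc.getD i 0 ≤ 0) : fzV moc i j = (moc.length : Int) + 1 := by
  have h : moc.length - i = (moc.length - i - 1) + 1 := by omega
  rw [fzV, h]; simp only [frogV]; rw [if_pos he]

lemma fzV_out (moc : List Int) (i j : Nat) (hi : i < moc.length)
    (he : ¬ (j : Int) + moc.getD i 0 ≤ 0)
    (ho : (moc.length : Int) ≤ (i : Int) + ((j : Int) + moc.getD i 0)) : fzV moc i j = 1 := by
  have h : moc.length - i = (moc.length - i - 1) + 1 := by omega
  rw [fzV, h]; simp only [frogV]; rw [if_neg he, if_pos ho]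

lemma fzV_mid (moc : List Int) (i j : Nat) (hi : i < moc.length)
    (he : ¬ (j : Int) + moc.getD i 0 ≤ 0)
    (ho : ¬ (moc.length : Int) ≤ (i : Int) + ((j : Int) + moc.getD i 0)) :
    fzV moc i j = 1 + ((List.range' (i+1) (((i : Int) + ((j : Int) + moc.getD i 0)).toNat - i)).map
      (fun p => fzV moc p (((i : Int) + ((j : Int) + moc.getD i 0)).toNat - p))).foldl min (moc.length : Int) := by
  have h : moc.length - i = (moc.length - i - 1) + 1 := by omega
  rw [fzV, h]; simp only [frogV]; rw [if_neg he, if_neg ho]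
  congr 1
  congr 1
  apply List.map_congr_left
  intro p hp
  have hp' := List.mem_range'.mp hp
  have hs : ((i : Int) + ((j : Int) + moc.getD i 0)).toNat < moc.length := by omega
  exact frogV_congr moc _ _ p _ (by omega) (by omega) (by omega)

-- fzV in terms of the diagonal minimum (what B computes)
lemma fzV_mid_diag (moc : List Int) (i j : Nat) (hi : i < moc.length)
    (he : ¬ (j : Int) + moc.getD i 0 ≤ 0)
    (ho : ¬ (moc.length : Int) ≤ (i : Int) + ((j : Int) + moc.getD i 0)) :
    fzV moc i j = 1 + min (moc.length : Int)
      (fzDiag moc (i+1) (((i : Int) + ((j : Int) + moc.getD i 0)).toNat)) := by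
  rw [fzV_mid moc i j hi he ho, fzDiag]
  congr 1
  have h1 : (((i : Int) + ((j : Int) + moc.getD i 0)).toNat + 1 - (i + 1))
      = (((i : Int) + ((j : Int) + moc.getD i 0)).toNat - i) := by omega
  rw [h1]
  conv_lhs => rw [show ((moc.length : Int)) = min ((moc.length : Int) + 2) ((moc.length : Int)) by
    rw [min_eq_right]; omega]
  rw [fzFoldlMin]

-- one diagonal step: adding row i to the diagonal minimum
lemma fzDiag_cons (moc : List Int) (i s : Nat) (h : i ≤ s) :
    fzDiag moc i s = min (fzV moc i (s - i)) (fzDiag moc (i+1) s) := by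
  rw [fzDiag, fzDiag, show s + 1 - i = (s - i) + 1 by omega, List.range'_succ]
  simp only [List.map_cons, List.foldl_cons]
  rw [show s + 1 - (i + 1) = s - i by omega, fzFoldlMin]

lemma fzDiag_empty (moc : List Int) (i s : Nat) (h : s < i) :
    fzDiag moc i s = (moc.length : Int) + 2 := by
  rw [fzDiag, show s + 1 - i = 0 by omega]; rfl

-- generic fold that sets ascending indices of a row
lemma fzBuild_len (g : Nat → Int) (k : Nat) (l : List Int) :
    (List.foldl (fun row j => row.set j (g j)) l (List.range k)).length = l.length := by
  induction k generalizing l with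
  | zero => rfl
  | succ k ih => rw [List.range_succ, List.foldl_append]; simp [ih]

lemma fzBuild_getD (g : Nat → Int) (k q : Nat) (l : List Int) (hq : q < k) (hk : k ≤ l.length) :
    (List.foldl (fun row j => row.set j (g j)) l (List.range k)).getD q 0 = g q := by
  induction k with
  | zero => omega
  | succ k ih =>
      rw [List.range_succ, List.foldl_append]
      simp only [List.foldl_cons, List.foldl_nil]
      by_cases hqk : q = k
      · subst hqk
        exact fz_getD_set_self _ _ _ _ (by rw [fzBuild_len]; omega)
      · rw [fz_getD_set_ne _ _ _ _ _ hqk]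
        exact ih (by omega) (by omega)

-- generic fold performing B's T update
lemma fzUpd_len (f : Nat → Int) (i k : Nat) (T : List Int) :
    (List.foldl (fun T t => if f t < T.getD (i+t) 0 then T.set (i+t) (f t) else T) T (List.range k)).length
      = T.length := by
  induction k generalizing T with
  | zero => rfl
  | succ k ih =>
      rw [List.range_succ, List.foldl_append]
      simp only [List.foldl_cons, List.foldl_nil]
      split
      · rw [List.length_set]; exact ih T
      · exact ih T

lemma fzUpd_getD (f : Nat → Int) (i k s : Nat) (T : List Int) :
    (List.foldl (fun T t => if f t < T.getD (i+t) 0 then T.set (i+t) (f t) else T) T (List.range k)).getD s 0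
      = if i ≤ s ∧ s < i + k ∧ s < T.length then min (T.getD s 0) (f (s - i)) else T.getD s 0 := by
  induction k with
  | zero => simp; omega
  | succ k ih =>
      rw [List.range_succ, List.foldl_append]
      simp only [List.foldl_cons, List.foldl_nil]
      set prev := List.foldl (fun T t => if f t < T.getD (i+t) 0 then T.set (i+t) (f t) else T) T (List.range k) with hprev
      have hlen : prev.length = T.length := fzUpd_len f i k T
      by_cases hks : s = i + k ∧ s < T.length
      · obtain ⟨hseq, hsl⟩ := hks
        subst hseq
        have hps : prev.getD (i+k) 0 = T.getD (i+k) 0 := by rw [ih, if_neg (by omega)]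
        rw [if_pos (by omega : i ≤ i + k ∧ i + k < i + (k+1) ∧ i + k < T.length),
          show i + k - i = k by omega]
        split
        · rename_i hlt
          rw [fz_getD_set_self _ _ _ _ (by omega)]
          rw [hps] at hlt
          omega
        · rename_i hge
          rw [hps] at hge ⊢
          omega
      · have hstep : (if f k < prev.getD (i+k) 0 then prev.set (i+k) (f k) else prev).getD s 0 = prev.getD s 0 := by
          split
          · by_cases hne : s = i + k
            · subst hne
              rw [List.set_eq_of_length_le (by omega)]
            · exact fz_getD_set_ne _ _ _ _ _ hne
          · rfl
        rw [hstep, ih]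
        by_cases hin : i ≤ s ∧ s < i + k ∧ s < T.length
        · rw [if_pos hin, if_pos (by omega)]
        · rw [if_neg hin, if_neg (by omega)]

-- B's loop body, split into its two inner folds (definitionally equal to the lambda in the port)
def fzRowB (moc : List Int) (T : List Int) (i : Int) : List Int :=
  (PySem.List.pyRange 0 ((moc.length : Int) - i) 1).foldl (fun row j =>
    let e : Int := j + PySem.List.pyGetD moc i 0
    if e ≤ 0 then PySem.List.pySetD row j (1 + (moc.length : Int))
    else if i + e ≥ (moc.length : Int) then PySem.List.pySetD row j 1
    else PySem.List.pySetD row j (1 + min (moc.length : Int) (PySem.List.pyGetD T (i + e) 0)))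
    (List.replicate ((moc.length : Int) - i).toNat (0 : Int))

def fzTB (moc : List Int) (T row : List Int) (i : Int) : List Int :=
  (PySem.List.pyRange 0 ((moc.length : Int) - i) 1).foldl (fun T j =>
    if PySem.List.pyGetD row j 0 < PySem.List.pyGetD T (i + j) 0 then
      PySem.List.pySetD T (i + j) (PySem.List.pyGetD row j 0)
    else T) T

def fzBodyB (moc : List Int) (st : List Int × List Int) (i : Int) : List Int × List Int :=
  (fzTB moc st.1 (fzRowB moc st.1 i) i, fzRowB moc st.1 i)

lemma fzAltEq (moc : List Int) : zabica_iterativno_alt moc =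
    (if (moc.length : Int) = 0 then 1 else
      PySem.List.pyGetD ((PySem.List.pyRange ((moc.length : Int) - 1) (-1) (-1)).foldl (fzBodyB moc)
        (List.replicate ((moc.length : Int)).toNat ((moc.length : Int) + 2), ([] : List Int))).2 0 0) := rfl

def fzInvB (moc : List Int) (i : Nat) (st : List Int × List Int) : Prop :=
  st.1.length = moc.length ∧
  (∀ s, s < moc.length → st.1.getD s 0 = fzDiag moc i s) ∧
  st.2.length = moc.length - i ∧
  (∀ q, q < moc.length - i → st.2.getD q 0 = fzV moc i q)

lemma fzRowBVal (moc : List Int) (i : Nat) (hi : i < moc.length) (T : List Int)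
    (hTs : ∀ s, s < moc.length → T.getD s 0 = fzDiag moc (i+1) s) :
    fzRowB moc T (i : Int)
      = List.foldl (fun (row : List Int) (t : Nat) => row.set t (fzV moc i t))
          (List.replicate (moc.length - i) (0 : Int)) (List.range (moc.length - i)) := by
  have hni : ((moc.length : Int) - (i : Int)) = ((moc.length - i : Nat) : Int) := by omega
  rw [fzRowB, hni, fzRange_asc, List.foldl_map, Int.toNat_natCast]
  apply PySem.List.foldl_congr_mem
  intro row t _
  simp only [PySem.List.pyGetD_natCast, PySem.List.pySetD_natCast]
  split
  · rename_i he
    rw [fzV_le moc i t hi he]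
    norm_num [add_comm]
  · rename_i he
    split
    · rename_i ho
      rw [fzV_out moc i t hi he (by omega)]
    · rename_i ho
      rw [fzV_mid_diag moc i t hi he (by omega)]
      have hgd : PySem.List.pyGetD T ((i : Int) + ((t : Int) + moc.getD i 0)) 0
          = fzDiag moc (i+1) (((i : Int) + ((t : Int) + moc.getD i 0)).toNat) := by
        conv_lhs => rw [show ((i : Int) + ((t : Int) + moc.getD i 0))
          = ((((i : Int) + ((t : Int) + moc.getD i 0)).toNat : Nat) : Int) by omega]
        rw [PySem.List.pyGetD_natCast, hTs _ (by omega)]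
      rw [hgd]

lemma fzTBVal (moc : List Int) (i : Nat) (hi : i ≤ moc.length) (T row : List Int) :
    fzTB moc T row (i : Int)
      = List.foldl (fun (T : List Int) (t : Nat) =>
          if row.getD t 0 < T.getD (i+t) 0 then T.set (i+t) (row.getD t 0) else T)
          T (List.range (moc.length - i)) := by
  have hni : ((moc.length : Int) - (i : Int)) = ((moc.length - i : Nat) : Int) := by omega
  rw [fzTB, hni, fzRange_asc, List.foldl_map]
  apply PySem.List.foldl_congr_mem
  intro T' t _
  have hc : ((i : Int) + (t : Int)) = (((i + t : Nat) : Int)) := by push_cast; ring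
  simp only [hc, PySem.List.pyGetD_natCast, PySem.List.pySetD_natCast]

lemma fzStepB (moc : List Int) (i : Nat) (hi : i < moc.length) (st : List Int × List Int)
    (h : fzInvB moc (i+1) st) : fzInvB moc i (fzBodyB moc st (i : Int)) := by
  obtain ⟨hT, hTs, _, _⟩ := h
  have hrow : (fzBodyB moc st (i : Int)).2
      = List.foldl (fun (row : List Int) (t : Nat) => row.set t (fzV moc i t))
          (List.replicate (moc.length - i) (0 : Int)) (List.range (moc.length - i)) :=
    fzRowBVal moc i hi st.1 hTs
  have hrowlen : (fzBodyB moc st (i : Int)).2.length = moc.length - i := by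
    rw [hrow, fzBuild_len, List.length_replicate]
  have hrowval : ∀ q, q < moc.length - i → (fzBodyB moc st (i : Int)).2.getD q 0 = fzV moc i q := by
    intro q hq
    rw [hrow, fzBuild_getD _ _ _ _ hq (by simp)]
  have hTeq : (fzBodyB moc st (i : Int)).1
      = List.foldl (fun (T : List Int) (t : Nat) =>
          if (fzBodyB moc st (i : Int)).2.getD t 0 < T.getD (i+t) 0 then
            T.set (i+t) ((fzBodyB moc st (i : Int)).2.getD t 0) else T)
          st.1 (List.range (moc.length - i)) :=
    fzTBVal moc i (by omega) st.1 (fzRowB moc st.1 (i : Int))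
  refine ⟨?_, ?_, hrowlen, hrowval⟩
  · rw [hTeq, fzUpd_len, hT]
  · intro s hs
    rw [hTeq, fzUpd_getD]
    by_cases his : i ≤ s
    · rw [if_pos ⟨his, by omega, by omega⟩, hTs s hs, hrowval _ (by omega),
        fzDiag_cons moc i s (by omega)]
      exact min_comm _ _
    · rw [if_neg (by omega), hTs s hs,
        fzDiag_empty moc (i+1) s (by omega), fzDiag_empty moc i s (by omega)]

lemma fzLoopB (moc : List Int) : ∀ (i0 : Nat), i0 ≤ moc.length → ∀ st, fzInvB moc i0 st →
    fzInvB moc 0 (List.foldl (fzBodyB moc) st (fzDesc i0)) := by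
  intro i0
  induction i0 with
  | zero => intro _ st h; simpa [fzDesc] using h
  | succ i0 ih =>
      intro h st hst
      rw [fzDesc_succ]
      simp only [List.foldl_cons]
      exact ih (by omega) _ (fzStepB moc i0 (by omega) st hst)

lemma fzBVal (moc : List Int) (h : moc ≠ []) : zabica_iterativno_alt moc = fzV moc 0 0 := by
  have hn : 0 < moc.length := List.length_pos_iff.mpr h
  rw [fzAltEq, if_neg (by omega), fzRange_desc]
  have hinit : fzInvB moc moc.length
      (List.replicate ((moc.length : Int)).toNat ((moc.length : Int) + 2), ([] : List Int)) := by
    refine ⟨by simp, ?_, by simp, by intro q hq; omega⟩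
    intro s hs
    rw [fzDiag_empty moc moc.length s (by omega)]
    simp [List.getD, hs]
  obtain ⟨_, _, hlen2, hval⟩ := fzLoopB moc moc.length le_rfl _ hinit
  rw [PySem.List.pyGetD_zero]
  have := hval 0 (by omega)
  simpa [List.getD] using this

-- A's loop bodies, named (definitionally equal to the lambdas in the port)
def fzBodyA (moc : List Int) (dp : List (List Int)) (i j : Int) : List (List Int) :=
  let m : Int := (moc.length : Int)
  let e : Int := j + PySem.List.pyGetD moc i 0
  if i + j > (moc.length : Int) then
    PySem.List.pySetD dp i (PySem.List.pySetD (PySem.List.pyGetD dp i []) j 1)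
  else
    let m := (PySem.List.pyRange 1 (e + 1) 1).foldl (fun m d =>
      if i + d ≥ (moc.length : Int) then 0
      else if e - d ≥ (moc.length : Int) then 1
      else min m (PySem.List.pyGetD (PySem.List.pyGetD dp (i + d) []) (e - d) 0)) m
    PySem.List.pySetD dp i (PySem.List.pySetD (PySem.List.pyGetD dp i []) j (1 + m))

def fzInitA (moc : List Int) (dp : List (List Int)) (i : Int) : List (List Int) :=
  let dp := PySem.List.pySetD dp (moc.length : Int)
    (PySem.List.pySetD (PySem.List.pyGetD dp (moc.length : Int) []) i 0)
  PySem.List.pySetD dp ((moc.length : Int) - 1)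
    (PySem.List.pySetD (PySem.List.pyGetD dp ((moc.length : Int) - 1) []) i 1)

lemma fzAEq (moc : List Int) : zabica_iterativno moc =
    PySem.List.pyGetD (PySem.List.pyGetD
      ((PySem.List.pyRange ((moc.length : Int) - 1) (-1) (-1)).foldl (fun dp i =>
        (PySem.List.pyRange ((moc.length : Int) - 1) (-1) (-1)).foldl (fun dp j => fzBodyA moc dp i j) dp)
        ((PySem.List.pyRange 0 ((moc.length : Int) + 1) 1).foldl (fzInitA moc)
          (List.replicate ((moc.length : Int) + 1).toNat (List.replicate ((moc.length : Int) + 1).toNat (0 : Int)))))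
      0 []) 0 0 := rfl

def fzShape (moc : List Int) (dp : List (List Int)) : Prop :=
  dp.length = moc.length + 1 ∧ ∀ p, p < moc.length + 1 → (dp.getD p []).length = moc.length + 1

def fzDone (moc : List Int) (i0 : Nat) (dp : List (List Int)) : Prop :=
  ∀ p q, i0 ≤ p → p < moc.length → q < moc.length → (dp.getD p []).getD q 0 = fzW moc p q

def fzRowPart (moc : List Int) (i j0 : Nat) (dp : List (List Int)) : Prop :=
  ∀ q, j0 ≤ q → q < moc.length → (dp.getD i []).getD q 0 = fzW moc i q

-- shape is preserved by writing a row of the right length back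
lemma fzShape_set (moc : List Int) (dp : List (List Int)) (hsh : fzShape moc dp)
    (a : Nat) (ha : a < moc.length + 1) (r : List Int) (hr : r.length = moc.length + 1) :
    fzShape moc (dp.set a r) := by
  refine ⟨by rw [List.length_set]; exact hsh.1, ?_⟩
  intro p hp
  by_cases hpa : p = a
  · subst hpa
    rw [fz_getD_set_self _ _ _ _ (by rw [hsh.1]; omega)]
    exact hr
  · rw [fz_getD_set_ne _ _ _ _ _ hpa]
    exact hsh.2 p hp

-- the value A writes into cell (i, j)
lemma fzStepA_key (moc : List Int) (i j : Nat) (hi : i < moc.length)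
    (dp : List (List Int)) (hdone : fzDone moc (i+1) dp) :
    fzBodyA moc dp (i : Int) (j : Int) = dp.set i ((dp.getD i []).set j (fzW moc i j)) := by
  rw [fzBodyA]
  simp only [PySem.List.pyGetD_natCast, PySem.List.pySetD_natCast]
  by_cases hij : ((i : Int) + (j : Int) > (moc.length : Int))
  · rw [if_pos hij, fzW, if_pos (by omega)]
  · rw [if_neg hij, fzW, if_neg (by omega)]
    set e : Int := (j : Int) + moc.getD i 0 with hedef
    by_cases he : e ≤ 0
    · rw [PySem.List.pyRange_one_eq_nil (by omega), List.foldl_nil, fzV_le moc i j hi he]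
      norm_num [add_comm]
    · by_cases ho : (moc.length : Int) ≤ (i : Int) + e
      · rw [PySem.List.pyRange_one_succ_right (by omega : (1 : Int) ≤ e),
          List.foldl_append, List.foldl_cons, List.foldl_nil,
          if_pos (by omega : (i : Int) + e ≥ (moc.length : Int)),
          fzV_out moc i j hi he (by omega)]
        norm_num
      · -- interior cell: the loop is a pure min-fold over the next diagonal
        set et : Nat := e.toNat with hetdef
        have hee : e = (et : Int) := by omega
        rw [fzV_mid moc i j hi he (by omega)]
        have h1 : PySem.List.pyRange 1 (e + 1) 1
            = (List.range et).map (fun k : Nat => (1 : Int) + (k : Int)) := by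
          rw [PySem.List.pyRange_one, show ((e + 1 - 1).toNat) = et by omega]
        have h2 : List.foldl (fun (m : Int) (k : Nat) =>
              if (i : Int) + ((1 : Int) + (k : Int)) ≥ (moc.length : Int) then 0
              else if e - ((1 : Int) + (k : Int)) ≥ (moc.length : Int) then 1
              else min m (PySem.List.pyGetD (PySem.List.pyGetD dp ((i : Int) + ((1 : Int) + (k : Int))) [])
                (e - ((1 : Int) + (k : Int))) 0)) (moc.length : Int) (List.range et)
            = List.foldl (fun (m : Int) (k : Nat) => min m (fzV moc (i+1+k) (et-1-k)))
                (moc.length : Int) (List.range et) := by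
          apply PySem.List.foldl_congr_mem
          intro m k hk
          have hk' : k < et := List.mem_range.mp hk
          rw [if_neg (show ¬ ((i : Int) + ((1 : Int) + (k : Int)) ≥ (moc.length : Int)) by omega),
            if_neg (show ¬ (e - ((1 : Int) + (k : Int)) ≥ (moc.length : Int)) by omega),
            show ((i : Int) + ((1 : Int) + (k : Int))) = (((i + 1 + k : Nat) : Int)) by push_cast; ring,
            show (e - ((1 : Int) + (k : Int))) = (((et - 1 - k : Nat) : Int)) by omega]
          simp only [PySem.List.pyGetD_natCast]
          rw [hdone (i+1+k) (et-1-k) (by omega) (by omega) (by omega), fzW, if_neg (by omega)]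
        rw [h1, List.foldl_map, h2,
          show (((i : Int) + ((j : Int) + moc.getD i 0)).toNat - i) = et by omega,
          List.range'_eq_map_range]
        simp only [List.foldl_map]
        have h4 : List.foldl (fun (m : Int) (k : Nat) =>
              min m (fzV moc (i + 1 + k) (((i : Int) + ((j : Int) + moc.getD i 0)).toNat - (i + 1 + k))))
              (moc.length : Int) (List.range et)
            = List.foldl (fun (m : Int) (k : Nat) => min m (fzV moc (i+1+k) (et-1-k)))
                (moc.length : Int) (List.range et) := by
          apply PySem.List.foldl_congr_mem
          intro m k hk
          have hk' : k < et := List.mem_range.mp hk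
          rw [show (((i : Int) + ((j : Int) + moc.getD i 0)).toNat - (i + 1 + k)) = et - 1 - k by omega]
        rw [h4]

lemma fzStepA (moc : List Int) (i j : Nat) (hi : i < moc.length) (hj : j < moc.length)
    (dp : List (List Int)) (hsh : fzShape moc dp) (hdone : fzDone moc (i+1) dp)
    (hrow : fzRowPart moc i (j+1) dp) :
    fzShape moc (fzBodyA moc dp (i : Int) (j : Int)) ∧
    fzDone moc (i+1) (fzBodyA moc dp (i : Int) (j : Int)) ∧
    fzRowPart moc i j (fzBodyA moc dp (i : Int) (j : Int)) := by
  rw [fzStepA_key moc i j hi dp hdone]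
  refine ⟨fzShape_set moc dp hsh i (by omega) _
    (by rw [List.length_set]; exact hsh.2 i (by omega)), ?_, ?_⟩
  · intro p q hp1 hp2 hq
    rw [fz_getD_set_ne _ _ _ _ _ (by omega : p ≠ i)]
    exact hdone p q hp1 hp2 hq
  · intro q hq1 hq2
    rw [fz_getD_set_self _ _ _ _ (by rw [hsh.1]; omega)]
    by_cases hqj : q = j
    · subst hqj
      exact fz_getD_set_self _ _ _ _ (by rw [hsh.2 i (by omega)]; omega)
    · rw [fz_getD_set_ne _ _ _ _ _ hqj]
      exact hrow q (by omega) hq2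

lemma fzRowLoopA (moc : List Int) (i : Nat) (hi : i < moc.length) :
    ∀ (j0 : Nat), j0 ≤ moc.length → ∀ dp, fzShape moc dp → fzDone moc (i+1) dp →
    fzRowPart moc i j0 dp →
    fzShape moc (List.foldl (fun dp j => fzBodyA moc dp (i : Int) j) dp (fzDesc j0)) ∧
    fzDone moc (i+1) (List.foldl (fun dp j => fzBodyA moc dp (i : Int) j) dp (fzDesc j0)) ∧
    fzRowPart moc i 0 (List.foldl (fun dp j => fzBodyA moc dp (i : Int) j) dp (fzDesc j0)) := by
  intro j0
  induction j0 with
  | zero =>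
      intro _ dp h1 h2 h3
      exact ⟨by simpa [fzDesc] using h1, by simpa [fzDesc] using h2, by simpa [fzDesc] using h3⟩
  | succ j0 ih =>
      intro hle dp h1 h2 h3
      rw [fzDesc_succ]
      simp only [List.foldl_cons]
      obtain ⟨g1, g2, g3⟩ := fzStepA moc i j0 hi (by omega) dp h1 h2 h3
      exact ih (by omega) _ g1 g2 g3

lemma fzLoopA (moc : List Int) :
    ∀ (i0 : Nat), i0 ≤ moc.length → ∀ dp, fzShape moc dp → fzDone moc i0 dp →
    fzDone moc 0 (List.foldl (fun dp i =>
      List.foldl (fun dp j => fzBodyA moc dp i j) dp (fzDesc moc.length)) dp (fzDesc i0)) := by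
  intro i0
  induction i0 with
  | zero => intro _ dp _ h2; simpa [fzDesc] using h2
  | succ i0 ih =>
      intro hle dp h1 h2
      rw [fzDesc_succ]
      simp only [List.foldl_cons]
      obtain ⟨g1, g2, g3⟩ := fzRowLoopA moc i0 (by omega) moc.length le_rfl dp h1
        (by intro p q hp1 hp2 hq; exact h2 p q (by omega) hp2 hq)
        (by intro q hq1 hq2; omega)
      refine ih (by omega) _ g1 ?_
      intro p q hp1 hp2 hq
      by_cases hpi : p = i0
      · subst hpi; exact g3 q (by omega) hq
      · exact g2 p q (by omega) hp2 hq

-- the initialisation loop only needs to produce a well-shaped table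
lemma fzInitA_shape (moc : List Int) (hn : 0 < moc.length) (dp : List (List Int))
    (hsh : fzShape moc dp) (x : Int) : fzShape moc (fzInitA moc dp x) := by
  rw [fzInitA]
  simp only [show ((moc.length : Int) - 1) = ((moc.length - 1 : Nat) : Int) by omega,
    PySem.List.pyGetD_natCast, PySem.List.pySetD_natCast]
  have h1 : fzShape moc (dp.set moc.length (PySem.List.pySetD (dp.getD moc.length []) x 0)) :=
    fzShape_set moc dp hsh moc.length (by omega) _
      (by rw [PySem.List.length_pySetD]; exact hsh.2 moc.length (by omega))
  exact fzShape_set moc _ h1 (moc.length - 1) (by omega) _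
    (by rw [PySem.List.length_pySetD]; exact h1.2 (moc.length - 1) (by omega))

lemma fzInitShape (moc : List Int) (h : moc ≠ []) :
    fzShape moc ((PySem.List.pyRange 0 ((moc.length : Int) + 1) 1).foldl (fzInitA moc)
      (List.replicate ((moc.length : Int) + 1).toNat (List.replicate ((moc.length : Int) + 1).toNat (0 : Int)))) := by
  have hn : 0 < moc.length := List.length_pos_iff.mpr h
  have base : fzShape moc (List.replicate ((moc.length : Int) + 1).toNat
      (List.replicate ((moc.length : Int) + 1).toNat (0 : Int))) := by
    constructor
    · simp
    · intro p hp
      rw [List.getD_replicate _ (by simp; omega)]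
      simp
  have pres : ∀ (L : List Int) (dp), fzShape moc dp → fzShape moc (L.foldl (fzInitA moc) dp) := by
    intro L
    induction L with
    | nil => intro dp h1; exact h1
    | cons x L ihL =>
        intro dp h1
        simp only [List.foldl_cons]
        exact ihL _ (fzInitA_shape moc hn dp h1 x)
  exact pres _ _ base

lemma fzAVal (moc : List Int) (h : moc ≠ []) : zabica_iterativno moc = fzV moc 0 0 := by
  have hn : 0 < moc.length := List.length_pos_iff.mpr h
  rw [fzAEq, fzRange_desc]
  have hdone := fzLoopA moc moc.length le_rfl _ (fzInitShape moc h)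
    (by intro p q hp1 hp2 _; omega)
  simp only [PySem.List.pyGetD_zero]
  rw [hdone 0 0 (by omega) hn hn, fzW, if_neg (by omega)]

-- ===== VERDICT (by name: the statement is the Claim_ definition above) =====
theorem zabica_iterativno_spec : Claim_equal_zabica_iterativno := by
  intro moc _
  unfold Spec_zabica_iterativno
  cases moc with
  | nil => decide
  | cons a l => rw [fzAVal _ (by simp), fzBVal _ (by simp)]
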